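-- pv_equiv track=rewrite | github.com/dongrixinyu/JioNLP | jionlp/gadget/money_num2char.py | _seg_integer_part
-- ===== SOURCE A (Python) =====
-- def _seg_integer_part(integer_part):
--     """ 将整数转换为每 4 个一节 """
--     seg_list = list()
--     flag = len(integer_part) % 4
--     if len(integer_part) % 4 != 0:
--         first_part = integer_part[:flag]
--         seg_list.append(first_part)
--
--     for i in range(flag, len(integer_part), 4):
--         seg_list.append(integer_part[i: i+4])
--
--     return seg_list
-- ===== SOURCE B (Python) =====
-- def _seg_integer_part(integer_part):
--     """ 将整数转换为每 4 个一节 """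
--     seg_list = []
--     s = integer_part
--     while s:
--         seg_list.insert(0, s[-4:])
--         s = s[:-4]
--     return seg_list
-- ===== Notes on version B (the rewrite author's own statement) =====
-- stated objective: simpler
-- what changed: B consumes the string right-to-left, prepending the last 4 characters each pass, so the len%4 leading-remainder branch and the explicit range bookkeeping disappear.
import Mathlib
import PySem

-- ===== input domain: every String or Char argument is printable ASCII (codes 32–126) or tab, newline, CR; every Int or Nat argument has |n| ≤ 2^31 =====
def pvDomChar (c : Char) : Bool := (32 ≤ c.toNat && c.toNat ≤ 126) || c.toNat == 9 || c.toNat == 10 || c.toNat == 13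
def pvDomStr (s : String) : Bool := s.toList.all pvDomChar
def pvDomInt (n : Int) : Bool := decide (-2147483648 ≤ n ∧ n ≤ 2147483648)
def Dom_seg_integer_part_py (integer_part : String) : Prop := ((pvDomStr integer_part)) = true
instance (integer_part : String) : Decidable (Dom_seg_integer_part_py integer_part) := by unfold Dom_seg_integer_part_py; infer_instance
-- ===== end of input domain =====

-- B walks the string right-to-left, prepending the last 4 characters each pass; this
-- removes A's len%4 leading-remainder branch and range bookkeeping (objective: simpler).

-- ===== PORT A =====
-- hand port of `for i in range(flag, len, 4): seg_list.append(integer_part[i:i+4])`: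
-- the same index loop, chunk s[i:i+4] = (drop i).take 4 (exact: both bounds nonnegative, Python clamps like take/drop)
def segLoopA (l : List Char) (n i : Nat) : List String :=
  if _h : i < n then String.mk ((l.drop i).take 4) :: segLoopA l n (i + 4) else []
  termination_by n - i

def seg_integer_part_py (integer_part : String) : List String :=
  let l := integer_part.toList
  let n := l.length
  let flag := n % 4
  -- s[:flag] = take flag (exact: flag ≥ 0, Python clamps like take)
  let seg0 : List String := if n % 4 ≠ 0 then [String.mk (l.take flag)] else []
  seg0 ++ segLoopA l n flag

-- ===== PORT B =====
-- while s: seg_list.insert(0, s[-4:]); s = s[:-4]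
-- s[-4:] = drop (len-4), s[:-4] = take (len-4) (exact: Python's negative-slice
-- clamping for len < 4 coincides with Nat truncated subtraction)
def segGoB (s : List Char) (acc : List String) : List String :=
  if _h : s = [] then acc
  else segGoB (s.take (s.length - 4)) (String.mk (s.drop (s.length - 4)) :: acc)
  termination_by s.length
  decreasing_by
    simp only [List.length_take]
    have : s.length ≠ 0 := by simpa using List.length_pos_of_ne_nil _h |>.ne'
    omega

def seg_integer_part_py_alt (integer_part : String) : List String :=
  segGoB integer_part.toList []

-- ===== PRECONDITION & SPEC =====
def Spec_seg_integer_part_py (integer_part : String) (out : List String) : Prop := out = seg_integer_part_py_alt integer_part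
instance (integer_part : String) (out : List String) : Decidable (Spec_seg_integer_part_py integer_part out) := by unfold Spec_seg_integer_part_py; infer_instance

-- ===== CLAIM (what is proved, stated in full; the proofs are below) =====
def Claim_equal_seg_integer_part_py : Prop := ∀ (integer_part : String), Dom_seg_integer_part_py integer_part → Spec_seg_integer_part_py integer_part (seg_integer_part_py integer_part)

-- ===== LEMMAS AND PROOFS =====

-- the A-side body, over a char list
def segA (l : List Char) : List String :=
  (if l.length % 4 ≠ 0 then [String.mk (l.take (l.length % 4))] else []) ++
    segLoopA l l.length (l.length % 4)

theorem segLoopA_prefix : ∀ (k : Nat) (l : List Char) (m i : Nat), m ≤ l.length →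
    m - i = k → (m - i) % 4 = 0 → segLoopA (l.take m) m i = segLoopA l m i := by
  intro k
  induction k using Nat.strong_induction_on with
  | _ k ih =>
    intro l m i hm hk hmod
    by_cases h : i < m
    · have h4 : i + 4 ≤ m := by omega
      have h1 : segLoopA (l.take m) m i
          = String.mk (((l.take m).drop i).take 4) :: segLoopA (l.take m) m (i + 4) := by
        rw [segLoopA, dif_pos h]
      have h2 : segLoopA l m i
          = String.mk ((l.drop i).take 4) :: segLoopA l m (i + 4) := by
        rw [segLoopA, dif_pos h]
      have hchunk : ((l.take m).drop i).take 4 = (l.drop i).take 4 := by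
        rw [List.drop_take, List.take_take]
        congr 1; omega
      rw [h1, h2, hchunk, ih (m - (i + 4)) (by omega) l m (i + 4) hm rfl (by omega)]
    · rw [segLoopA, dif_neg h, segLoopA, dif_neg h]

theorem segLoopA_last : ∀ (k : Nat) (l : List Char), 4 ≤ l.length →
    ∀ i, l.length - i = k → i ≤ l.length - 4 → (l.length - i) % 4 = 0 →
      segLoopA l l.length i
        = segLoopA l (l.length - 4) i ++ [String.mk ((l.drop (l.length - 4)).take 4)] := by
  intro k
  induction k using Nat.strong_induction_on with
  | _ k ih =>
    intro l h4 i hk hi hmod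
    by_cases hlt : i < l.length - 4
    · have h1 : segLoopA l l.length i
          = String.mk ((l.drop i).take 4) :: segLoopA l l.length (i + 4) := by
        rw [segLoopA, dif_pos (by omega)]
      have h2 : segLoopA l (l.length - 4) i
          = String.mk ((l.drop i).take 4) :: segLoopA l (l.length - 4) (i + 4) := by
        rw [segLoopA, dif_pos hlt]
      rw [h1, h2, ih (l.length - (i + 4)) (by omega) l h4 (i + 4) rfl (by omega) (by omega)]
      simp
    · have hieq : i = l.length - 4 := by omega
      subst hieq
      have hz : segLoopA l (l.length - 4) (l.length - 4) = [] := by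
        rw [segLoopA, dif_neg (by omega)]
      have hz2 : segLoopA l l.length (l.length - 4 + 4) = [] := by
        rw [segLoopA, dif_neg (by omega)]
      rw [segLoopA, dif_pos (by omega), hz2, hz]
      simp

-- peel the last chunk off A's result
theorem segA_step (l : List Char) (hne : l ≠ []) :
    segA l = segA (l.take (l.length - 4)) ++ [String.mk (l.drop (l.length - 4))] := by
  have hpos : 0 < l.length := List.length_pos_of_ne_nil hne
  by_cases h4 : 4 ≤ l.length
  · have hlen : (l.take (l.length - 4)).length = l.length - 4 := by
      simp [List.length_take]
    have hmod : (l.length - 4) % 4 = l.length % 4 := by omega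
    have hflag : l.length % 4 ≤ l.length - 4 := by omega
    unfold segA
    rw [hlen, hmod]
    rw [segLoopA_prefix ((l.length - 4) - l.length % 4) l (l.length - 4) (l.length % 4) (by omega) rfl (by omega)]
    have htk : (l.take (l.length - 4)).take (l.length % 4) = l.take (l.length % 4) := by
      rw [List.take_take]; congr 1; omega
    rw [htk]
    have hdz : (l.drop (l.length - 4)).take 4 = l.drop (l.length - 4) := by
      apply List.take_of_length_le
      simp only [List.length_drop]
      omega
    rw [segLoopA_last (l.length - l.length % 4) l h4 (l.length % 4) rfl hflag (by omega), hdz]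
    split <;> simp
  · -- 0 < len < 4 : A gives the single remainder chunk
    have hz : l.length - 4 = 0 := by omega
    have hmodne : l.length % 4 ≠ 0 := by omega
    unfold segA
    rw [hz]
    simp only [List.take_zero, List.drop_zero, List.length_nil]
    rw [if_pos hmodne]
    have h1 : segLoopA l l.length (l.length % 4) = [] := by
      rw [segLoopA, dif_neg (by omega)]
    have h2 : segLoopA ([] : List Char) 0 (0 % 4) = [] := by
      rw [segLoopA]; simp
    have hl : l.take (l.length % 4) = l := List.take_of_length_le (by omega)
    simp [h1, h2, hl]

theorem segGoB_eq : ∀ (n : Nat) (l : List Char), l.length = n →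
    ∀ acc, segGoB l acc = segA l ++ acc := by
  intro n
  induction n using Nat.strong_induction_on with
  | _ n ih =>
    intro l hlen acc
    rw [segGoB]
    split
    · next h => subst h; simp [segA, segLoopA]
    · next h =>
      have hpos : 0 < l.length := List.length_pos_of_ne_nil h
      have hlt : (l.take (l.length - 4)).length < n := by
        simp [List.length_take]; omega
      rw [ih _ (by omega) _ rfl]
      rw [segA_step l h]
      simp

-- ===== VERDICT (by name: the statement is the Claim_ definition above) =====
theorem seg_integer_part_py_spec : Claim_equal_seg_integer_part_py := by
  intro s _
  show seg_integer_part_py s = seg_integer_part_py_alt s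
  unfold seg_integer_part_py seg_integer_part_py_alt
  rw [segGoB_eq s.toList.length s.toList rfl []]
  simp [segA]
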